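-- pv_equiv track=rewrite | github.com/bgkcsav4/Snake-Game | program01.py | generate_image
-- ===== SOURCE A (Python) =====
-- def generate_image (image: list, position_general: [int,int], length:int):
--
--     green_list = []
--     grey_list = []
--     pg = position_general
--
--
--     for i in range(len(pg)-length,len(pg)):
--         green_list.append(pg[i])
--     for i in range(0,len(pg)-length):
--         grey_list.append(pg[i])
--
--     for i in grey_list:
--         x=i[0]
--         y=i[1]
--         image[y][x] = (128,128,128)
--     for i in green_list:
--         x=i[0]
--         y=i[1]
--         image[y][x] = (0,255,0)
--
--     return image
-- ===== SOURCE B (Python) =====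
-- def generate_image (image: list, position_general: [int,int], length:int):
--     threshold = len(position_general) - length
--     for i, p in enumerate(position_general):
--         image[p[1]][p[0]] = (128, 128, 128) if i < threshold else (0, 255, 0)
--     return image
-- ===== Notes on version B (the rewrite author's own statement) =====
-- stated objective: simpler
-- what changed: Replaces A's two index-range list builds (green/grey) plus two separate paint loops with a single enumerate pass that paints each position grey or green depending on whether its index is below len(position_general) - length.
import Mathlib
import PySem

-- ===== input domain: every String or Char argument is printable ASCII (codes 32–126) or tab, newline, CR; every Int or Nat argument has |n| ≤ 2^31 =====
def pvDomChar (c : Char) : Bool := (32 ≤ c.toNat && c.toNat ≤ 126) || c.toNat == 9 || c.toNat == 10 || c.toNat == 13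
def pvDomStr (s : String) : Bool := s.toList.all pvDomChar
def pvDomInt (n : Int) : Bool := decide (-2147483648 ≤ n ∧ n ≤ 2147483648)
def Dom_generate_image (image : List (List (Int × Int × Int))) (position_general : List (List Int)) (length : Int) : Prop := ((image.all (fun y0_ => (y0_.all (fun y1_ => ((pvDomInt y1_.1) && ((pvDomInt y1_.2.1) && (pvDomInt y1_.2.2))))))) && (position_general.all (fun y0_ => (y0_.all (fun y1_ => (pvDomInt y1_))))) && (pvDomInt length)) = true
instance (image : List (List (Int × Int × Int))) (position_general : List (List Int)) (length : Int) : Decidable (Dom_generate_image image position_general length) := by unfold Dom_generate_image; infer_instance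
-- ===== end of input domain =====

-- B is simpler: one conditional pass over enumerate(position_general) instead of A's two index-range
-- list builds plus two separate paint loops. Equivalence is about the RETURN value (both Pythons also
-- mutate `image` in place, and they leave it in the same final state).

-- shared helper: the Python statement `image[p[1]][p[0]] = c` (both A and B execute exactly this)
def pvPaint (img : List (List (Int × Int × Int))) (p : List Int) (c : Int × Int × Int) : List (List (Int × Int × Int)) :=
  let x := PySem.List.pyGetD p 0 0
  let y := PySem.List.pyGetD p 1 0
  PySem.List.pySetD img y (PySem.List.pySetD (PySem.List.pyGetD img y []) x c)

-- ===== PORT A =====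
def generate_image (image : List (List (Int × Int × Int))) (position_general : List (List Int)) (length : Int) : List (List (Int × Int × Int)) :=
  let pg := position_general
  let n : Int := pg.length
  let green_list := (PySem.List.pyRange (n - length) n 1).foldl (fun acc i => acc ++ [PySem.List.pyGetD pg i []]) []
  let grey_list := (PySem.List.pyRange 0 (n - length) 1).foldl (fun acc i => acc ++ [PySem.List.pyGetD pg i []]) []
  let img1 := grey_list.foldl (fun im p => pvPaint im p (128, 128, 128)) image
  green_list.foldl (fun im p => pvPaint im p (0, 255, 0)) img1

-- ===== PORT B =====
def generate_image_alt (image : List (List (Int × Int × Int))) (position_general : List (List Int)) (length : Int) : List (List (Int × Int × Int)) :=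
  let threshold : Int := (position_general.length : Int) - length
  (PySem.List.enumerate position_general).foldl
    (fun im ip => pvPaint im ip.2 (if ip.1 < threshold then (128, 128, 128) else (0, 255, 0))) image

-- ===== PRECONDITION & SPEC =====
-- position p can be read (p[0], p[1]) and addresses a pixel inside the image (Python negative indexing allowed)
def pvValidPos (image : List (List (Int × Int × Int))) (p : List Int) : Prop :=
  2 ≤ p.length ∧
  PySem.Raise.InRange image.length (PySem.List.pyGetD p 1 0) ∧
  PySem.Raise.InRange (PySem.List.pyGetD image (PySem.List.pyGetD p 1 0) []).length (PySem.List.pyGetD p 0 0)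

-- exactly where the Python A returns: length within [0, 2·len(pg)] (outside, an index overruns and A
-- raises IndexError) and every position addresses a pixel of the image (otherwise A raises too)
def Pre_generate_image (image : List (List (Int × Int × Int))) (position_general : List (List Int)) (length : Int) : Prop :=
  0 ≤ length ∧ length ≤ 2 * (position_general.length : Int) ∧
  ∀ p ∈ position_general, pvValidPos image p
instance (image : List (List (Int × Int × Int))) (position_general : List (List Int)) (length : Int) : Decidable (Pre_generate_image image position_general length) := by unfold Pre_generate_image pvValidPos PySem.Raise.InRange; infer_instance

def pvWitness_generate_image : (List (List (Int × Int × Int))) × List (List Int) × Int :=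
  ([[(0, 0, 0), (5, 5, 5)], [(7, 7, 7), (9, 9, 9)]], [[0, 0], [1, 1]], 1)

def Spec_generate_image (image : List (List (Int × Int × Int))) (position_general : List (List Int)) (length : Int) (out : List (List (Int × Int × Int))) : Prop := out = generate_image_alt image position_general length
instance (image : List (List (Int × Int × Int))) (position_general : List (List Int)) (length : Int) (out : List (List (Int × Int × Int))) : Decidable (Spec_generate_image image position_general length out) := by unfold Spec_generate_image; infer_instance

-- ===== CLAIM (what is proved, stated in full; the proofs are below) =====
def Claim_equal_generate_image : Prop := ∀ (image : List (List (Int × Int × Int))) (position_general : List (List Int)) (length : Int), Dom_generate_image image position_general length → Pre_generate_image image position_general length → Spec_generate_image image position_general length (generate_image image position_general length)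

-- ===== LEMMAS AND PROOFS =====

-- Python index normalisation to a Nat, valid under InRange
def pvNorm (n : Nat) (i : Int) : Nat := if 0 ≤ i then i.toNat else n - (-i).toNat

theorem pvIdx_eq {n : Nat} {i : Int} (h : PySem.Raise.InRange n i) :
    PySem.List.pyIdx? n i = some (pvNorm n i) := by
  obtain ⟨h1, h2⟩ := h
  simp only [PySem.List.pyIdx?, pvNorm]
  split_ifs with h0 <;> simp_all

theorem pvNorm_lt {n : Nat} {i : Int} (h : PySem.Raise.InRange n i) : pvNorm n i < n := by
  obtain ⟨h1, h2⟩ := h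
  simp only [pvNorm]
  split_ifs <;> omega

theorem pvGetD_norm {α : Type} {xs : List α} {i : Int} (d : α) (h : PySem.Raise.InRange xs.length i) :
    PySem.List.pyGetD xs i d = xs.getD (pvNorm xs.length i) d := by
  simp [PySem.List.pyGetD, PySem.List.pyGet?, pvIdx_eq h, List.getD_eq_getElem?_getD]

theorem pvSetD_norm {α : Type} {xs : List α} {i : Int} (v : α) (h : PySem.Raise.InRange xs.length i) :
    PySem.List.pySetD xs i v = xs.set (pvNorm xs.length i) v := by
  simp [PySem.List.pySetD, PySem.List.pySet?, pvIdx_eq h]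

theorem pvSetD_oob {α : Type} {xs : List α} {i : Int} (v : α) (h : ¬ PySem.Raise.InRange xs.length i) :
    PySem.List.pySetD xs i v = xs := by
  have := (PySem.List.pySet?_eq_none_iff (xs := xs) (i := i) (v := v)).2 h
  simp [PySem.List.pySetD, this]

theorem pvSetD_comm_same {α : Type} (xs : List α) (i j : Int) (v : α) :
    PySem.List.pySetD (PySem.List.pySetD xs i v) j v = PySem.List.pySetD (PySem.List.pySetD xs j v) i v := by
  by_cases hi : PySem.Raise.InRange xs.length i
  · by_cases hj : PySem.Raise.InRange xs.length j
    · rw [pvSetD_norm v hi, pvSetD_norm v hj]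
      rw [pvSetD_norm v (by simpa using hj), pvSetD_norm v (by simpa using hi)]
      simp only [List.length_set]
      by_cases hij : pvNorm xs.length i = pvNorm xs.length j
      · rw [hij, List.set_set]
      · rw [List.set_comm _ _ hij]
    · rw [pvSetD_oob v hj, pvSetD_norm v hi, pvSetD_oob v (by simpa using hj)]
  · rw [pvSetD_oob v hi]
    by_cases hj : PySem.Raise.InRange xs.length j
    · rw [pvSetD_norm v hj, pvSetD_oob v (by simpa using hi)]
    · rw [pvSetD_oob v hj, pvSetD_oob v hi]

theorem pvSetD_idem {α : Type} (xs : List α) (i : Int) (v : α) :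
    PySem.List.pySetD (PySem.List.pySetD xs i v) i v = PySem.List.pySetD xs i v := by
  by_cases hi : PySem.Raise.InRange xs.length i
  · rw [pvSetD_norm v hi, pvSetD_norm v (by simpa using hi)]
    simp [List.set_set]
  · rw [pvSetD_oob v hi, pvSetD_oob v hi]

theorem pvPaint_oob (img : List (List (Int × Int × Int))) (p : List Int) (c : Int × Int × Int)
    (h : ¬ PySem.Raise.InRange img.length (PySem.List.pyGetD p 1 0)) : pvPaint img p c = img := by
  unfold pvPaint; exact pvSetD_oob _ h

theorem pvPaint_eq (img : List (List (Int × Int × Int))) (p : List Int) (c : Int × Int × Int)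
    (h : PySem.Raise.InRange img.length (PySem.List.pyGetD p 1 0)) :
    pvPaint img p c = img.set (pvNorm img.length (PySem.List.pyGetD p 1 0))
      (PySem.List.pySetD (img.getD (pvNorm img.length (PySem.List.pyGetD p 1 0)) []) (PySem.List.pyGetD p 0 0) c) := by
  unfold pvPaint
  rw [pvSetD_norm _ h, pvGetD_norm _ h]

theorem pvPaint_length (img : List (List (Int × Int × Int))) (p : List Int) (c : Int × Int × Int) :
    (pvPaint img p c).length = img.length := by
  by_cases h : PySem.Raise.InRange img.length (PySem.List.pyGetD p 1 0)
  · rw [pvPaint_eq _ _ _ h]; simp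
  · rw [pvPaint_oob _ _ _ h]

theorem pvPaint_comm (img : List (List (Int × Int × Int))) (p q : List Int) (c : Int × Int × Int) :
    pvPaint (pvPaint img p c) q c = pvPaint (pvPaint img q c) p c := by
  by_cases hp : PySem.Raise.InRange img.length (PySem.List.pyGetD p 1 0)
  · by_cases hq : PySem.Raise.InRange img.length (PySem.List.pyGetD q 1 0)
    · have hp1 : PySem.Raise.InRange (pvPaint img q c).length (PySem.List.pyGetD p 1 0) := by
        rwa [pvPaint_length]
      have hq1 : PySem.Raise.InRange (pvPaint img p c).length (PySem.List.pyGetD q 1 0) := by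
        rwa [pvPaint_length]
      rw [pvPaint_eq (pvPaint img p c) q c hq1, pvPaint_eq (pvPaint img q c) p c hp1]
      simp only [pvPaint_length]
      rw [pvPaint_eq img p c hp, pvPaint_eq img q c hq]
      set k1 := pvNorm img.length (PySem.List.pyGetD p 1 0) with hk1
      set k2 := pvNorm img.length (PySem.List.pyGetD q 1 0) with hk2
      have hlt1 : k1 < img.length := pvNorm_lt hp
      have hlt2 : k2 < img.length := pvNorm_lt hq
      by_cases hij : k1 = k2
      · rw [← hij, List.set_set, List.set_set]
        have r1 : (img.set k1 (PySem.List.pySetD (img.getD k1 []) (PySem.List.pyGetD p 0 0) c)).getD k1 []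
            = PySem.List.pySetD (img.getD k1 []) (PySem.List.pyGetD p 0 0) c := by
          simp [List.getD_eq_getElem?_getD, List.getElem?_set_self hlt1]
        have r2 : (img.set k1 (PySem.List.pySetD (img.getD k1 []) (PySem.List.pyGetD q 0 0) c)).getD k1 []
            = PySem.List.pySetD (img.getD k1 []) (PySem.List.pyGetD q 0 0) c := by
          simp [List.getD_eq_getElem?_getD, List.getElem?_set_self hlt1]
        rw [r1, r2, pvSetD_comm_same]
      · have r1 : (img.set k1 (PySem.List.pySetD (img.getD k1 []) (PySem.List.pyGetD p 0 0) c)).getD k2 []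
            = img.getD k2 [] := by
          simp [List.getD_eq_getElem?_getD, List.getElem?_set_ne hij]
        have r2 : (img.set k2 (PySem.List.pySetD (img.getD k2 []) (PySem.List.pyGetD q 0 0) c)).getD k1 []
            = img.getD k1 [] := by
          simp [List.getD_eq_getElem?_getD, List.getElem?_set_ne (Ne.symm hij)]
        rw [r1, r2, List.set_comm _ _ hij]
    · have hq1 : ¬ PySem.Raise.InRange (pvPaint img p c).length (PySem.List.pyGetD q 1 0) := by
        rwa [pvPaint_length]
      simp only [pvPaint_oob _ _ _ hq1, pvPaint_oob _ _ _ hq]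
  · by_cases hq : PySem.Raise.InRange img.length (PySem.List.pyGetD q 1 0)
    · have hp1 : ¬ PySem.Raise.InRange (pvPaint img q c).length (PySem.List.pyGetD p 1 0) := by
        rwa [pvPaint_length]
      simp only [pvPaint_oob _ _ _ hp, pvPaint_oob _ _ _ hp1]
    · simp only [pvPaint_oob _ _ _ hp, pvPaint_oob _ _ _ hq]

theorem pvPaint_idem (img : List (List (Int × Int × Int))) (p : List Int) (c : Int × Int × Int) :
    pvPaint (pvPaint img p c) p c = pvPaint img p c := by
  by_cases hp : PySem.Raise.InRange img.length (PySem.List.pyGetD p 1 0)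
  · have hp1 : PySem.Raise.InRange (pvPaint img p c).length (PySem.List.pyGetD p 1 0) := by
      rwa [pvPaint_length]
    rw [pvPaint_eq (pvPaint img p c) p c hp1]
    simp only [pvPaint_length]
    rw [pvPaint_eq img p c hp]
    set k1 := pvNorm img.length (PySem.List.pyGetD p 1 0) with hk1
    have hlt1 : k1 < img.length := pvNorm_lt hp
    have r : (img.set k1 (PySem.List.pySetD (img.getD k1 []) (PySem.List.pyGetD p 0 0) c)).getD k1 []
        = PySem.List.pySetD (img.getD k1 []) (PySem.List.pyGetD p 0 0) c := by
      simp [List.getD_eq_getElem?_getD, List.getElem?_set_self hlt1]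
    rw [r, pvSetD_idem, List.set_set]
  · have hp1 : ¬ PySem.Raise.InRange (pvPaint img p c).length (PySem.List.pyGetD p 1 0) := by
      rwa [pvPaint_length]
    simp only [pvPaint_oob _ _ _ hp]

-- painting p first is absorbed when p is repainted (same colour) later in the list
theorem pvAbsorb (c : Int × Int × Int) :
    ∀ (l : List (List Int)) (img : List (List (Int × Int × Int))) (p : List Int), p ∈ l →
      l.foldl (fun im q => pvPaint im q c) (pvPaint img p c) = l.foldl (fun im q => pvPaint im q c) img := by
  intro l
  induction l with
  | nil => intro img p hp; simp at hp
  | cons q rest ih =>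
    intro img p hp
    simp only [List.foldl_cons]
    rcases List.mem_cons.1 hp with h | h
    · subst h; rw [pvPaint_idem]
    · rw [pvPaint_comm]; exact ih (pvPaint img q c) p h

-- pre-painting any sublist of l (same colour) does not change the result of painting l
theorem pvSubsetFold (c : Int × Int × Int) :
    ∀ (l1 l2 : List (List Int)) (img : List (List (Int × Int × Int))), (∀ p ∈ l1, p ∈ l2) →
      l2.foldl (fun im q => pvPaint im q c) (l1.foldl (fun im q => pvPaint im q c) img) =
      l2.foldl (fun im q => pvPaint im q c) img := by
  intro l1
  induction l1 with
  | nil => intro l2 img _; rfl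
  | cons p rest ih =>
    intro l2 img h
    simp only [List.foldl_cons]
    rw [ih l2 (pvPaint img p c) (fun q hq => h q (List.mem_cons_of_mem _ hq))]
    exact pvAbsorb c l2 img p (h p List.mem_cons_self)

theorem pvEnum_cons {α : Type} (x : α) (xs : List α) (s : Int) :
    PySem.List.enumerate (x :: xs) s = (s, x) :: PySem.List.enumerate xs (s + 1) := rfl

-- B's single pass splits into a grey pass on the first (t - off) elements and a green pass on the rest
theorem pvB_split (t : Int) :
    ∀ (pg : List (List Int)) (off : Int) (img : List (List (Int × Int × Int))),
      (PySem.List.enumerate pg off).foldl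
        (fun im ip => pvPaint im ip.2 (if ip.1 < t then (128, 128, 128) else (0, 255, 0))) img =
      (pg.drop (t - off).toNat).foldl (fun im q => pvPaint im q (0, 255, 0))
        ((pg.take (t - off).toNat).foldl (fun im q => pvPaint im q (128, 128, 128)) img) := by
  intro pg
  induction pg with
  | nil => intro off img; simp [PySem.List.enumerate]
  | cons p rest ih =>
    intro off img
    rw [pvEnum_cons]
    simp only [List.foldl_cons]
    by_cases h : off < t
    · have hpos : (t - off).toNat = (t - (off + 1)).toNat + 1 := by omega
      rw [hpos]
      simp only [List.take_succ_cons, List.drop_succ_cons, List.foldl_cons, if_pos h]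
      exact ih (off + 1) (pvPaint img p (128, 128, 128))
    · have h0 : (t - off).toNat = 0 := by omega
      have h1 : (t - (off + 1)).toNat = 0 := by omega
      rw [h0]
      simp only [List.take_zero, List.drop_zero, List.foldl_nil, List.foldl_cons, if_neg h]
      rw [ih (off + 1) (pvPaint img p (0, 255, 0)), h1]
      simp

-- A's appended-singleton loops are maps over the ranges
theorem pvBuild (pg : List (List Int)) (a b : Int) :
    (PySem.List.pyRange a b 1).foldl (fun acc i => acc ++ [PySem.List.pyGetD pg i []]) [] =
      (PySem.List.pyRange a b 1).map (fun i => PySem.List.pyGetD pg i []) := by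
  rw [PySem.List.foldl_append_singleton_eq_map]
  simp

theorem pvMapTake (pg : List (List Int)) (t : Int) (h0 : 0 ≤ t) (hn : t ≤ (pg.length : Int)) :
    (PySem.List.pyRange 0 t 1).map (fun i => PySem.List.pyGetD pg i []) = pg.take t.toNat := by
  have hsplit := PySem.List.pyRange_one_append 0 t (pg.length : Int) h0 hn
  have hwhole : (PySem.List.pyRange 0 (pg.length : Int) 1).map (fun i => PySem.List.pyGetD pg i []) = pg :=
    PySem.List.map_pyGetD_pyRange_zero' pg []
  have hdrop : (PySem.List.pyRange t (pg.length : Int) 1).map (fun i => PySem.List.pyGetD pg i []) = pg.drop t.toNat :=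
    PySem.List.map_pyGetD_pyRange' pg [] h0
  have h2 : (PySem.List.pyRange 0 t 1).map (fun i => PySem.List.pyGetD pg i []) ++ pg.drop t.toNat
      = pg.take t.toNat ++ pg.drop t.toNat := by
    calc (PySem.List.pyRange 0 t 1).map (fun i => PySem.List.pyGetD pg i []) ++ pg.drop t.toNat
        = (PySem.List.pyRange 0 t 1).map (fun i => PySem.List.pyGetD pg i [])
          ++ (PySem.List.pyRange t (pg.length : Int) 1).map (fun i => PySem.List.pyGetD pg i []) := by
          rw [hdrop]
      _ = (PySem.List.pyRange 0 (pg.length : Int) 1).map (fun i => PySem.List.pyGetD pg i []) := by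
          rw [← List.map_append, ← hsplit]
      _ = pg := hwhole
      _ = pg.take t.toNat ++ pg.drop t.toNat := (List.take_append_drop _ _).symm
  have hlen : ((PySem.List.pyRange 0 t 1).map (fun i => PySem.List.pyGetD pg i [])).length = (pg.take t.toNat).length := by
    simp [PySem.List.length_pyRange_one]
    omega
  exact List.append_inj_left h2 hlen

-- ===== VERDICT (by name: the statement is the Claim_ definition above) =====
theorem generate_image_spec : Claim_equal_generate_image := by
  intro image pg length _ hpre
  obtain ⟨hl0, hl2, _⟩ := hpre
  unfold Spec_generate_image generate_image generate_image_alt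
  simp only []
  rw [pvB_split, pvBuild, pvBuild]
  simp only [sub_zero]
  set n : Int := (pg.length : Int)
  set t : Int := n - length with ht
  by_cases hts : 0 ≤ t
  · -- 0 ≤ length ≤ len(pg): A's grey list is take, its green list is drop
    have htn : t ≤ n := by omega
    rw [pvMapTake pg t hts htn, PySem.List.map_pyGetD_pyRange' pg [] hts]
  · -- len(pg) < length ≤ 2·len(pg): grey empty, green covers pg with wrapped duplicates repainted green
    have ht0 : t < 0 := by omega
    have htn : -n ≤ t := by omega
    rw [PySem.List.pyRange_one_eq_nil (le_of_lt ht0)]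
    have hsplit := PySem.List.pyRange_one_append t 0 n (le_of_lt ht0) (by positivity)
    rw [hsplit, List.map_append, PySem.List.map_pyGetD_pyRange_zero' pg []]
    have h0 : t.toNat = 0 := by omega
    rw [h0]
    simp only [List.take_zero, List.drop_zero, List.foldl_nil, List.map_nil, List.foldl_append]
    exact pvSubsetFold (0, 255, 0) _ pg image (by
      intro p hp
      simp only [List.mem_map] at hp
      obtain ⟨i, hi, hpi⟩ := hp
      rw [PySem.List.mem_pyRange_one] at hi
      have hir : PySem.Raise.InRange pg.length i := ⟨by omega, by omega⟩
      rw [← hpi]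
      exact PySem.List.pyGetD_mem pg [] hir)
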